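-- pv_equiv track=rewrite | github.com/jelmer/janitor | janitor/debdiff.py | _iter_fields
-- ===== SOURCE A (Python) =====
-- def _iter_fields(lines):
--     cl = []
--     for line in lines:
--         if cl and line.startswith(' '):
--             cl.append(line)
--         else:
--             yield cl
--             cl = [line]
--     if cl:
--         yield cl
-- ===== SOURCE B (Python) =====
-- def _scan_cont(lines, j):
--     # advance j past the run of continuation lines (those starting with ' ')
--     while j < len(lines) and lines[j].startswith(' '):
--         j += 1
--     return j
--
--
-- def _iter_fields(lines):
--     lines = list(lines)
--     if not lines:
--         return
--     yield []
--     i, n = 0, len(lines)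
--     while i < n:
--         j = _scan_cont(lines, i + 1)
--         yield lines[i:j]
--         i = j
-- ===== Notes on version B (the rewrite author's own statement) =====
-- stated objective: alternative
-- what changed: B materializes the input and emits each block as a slice found by a two-pointer index scan (header index i, scan j past the run of continuation lines), instead of A's streaming pass that accumulates a running block and flushes it on each boundary; B yields the leading empty block once up front.
import Mathlib
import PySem

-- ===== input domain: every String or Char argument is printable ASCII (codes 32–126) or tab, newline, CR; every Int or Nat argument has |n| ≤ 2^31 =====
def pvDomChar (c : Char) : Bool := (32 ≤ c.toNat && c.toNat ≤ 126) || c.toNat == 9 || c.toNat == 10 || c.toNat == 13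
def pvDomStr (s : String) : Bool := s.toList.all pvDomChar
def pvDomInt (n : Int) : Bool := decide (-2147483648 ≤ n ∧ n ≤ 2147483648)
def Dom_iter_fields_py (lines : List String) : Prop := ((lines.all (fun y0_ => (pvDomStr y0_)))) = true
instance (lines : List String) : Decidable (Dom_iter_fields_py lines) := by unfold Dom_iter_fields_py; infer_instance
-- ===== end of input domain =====

-- B emits whole blocks by a two-pointer index scan over the materialized list (header plus its
-- run of continuation lines, yielded as a slice), instead of A's streaming accumulate-and-flush
-- pass; same yields, including the leading empty block. Both are generators; the outputs
-- compared here are the lists of yielded values.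

-- ===== PORT A =====
-- the generator's yields collected in order: state = (yielded so far, current block cl);
-- pvStepA is the loop body, the final 'if cl: yield cl' follows the fold
def pvStepA (s : List (List String) × List String) (line : String) :
    List (List String) × List String :=
  if s.2 ≠ [] ∧ PySem.Str.startswith line " " = true then (s.1, s.2 ++ [line])
  else (s.1 ++ [s.2], [line])

def iter_fields_py (lines : List String) : List (List String) :=
  let st := lines.foldl pvStepA ([], [])
  if st.2 ≠ [] then st.1 ++ [st.2] else st.1

-- ===== PORT B =====
-- port of _scan_cont: the while loop advancing j
def pvScanK (ls : List String) (k : Nat) : Nat :=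
  if k < ls.length ∧ PySem.Str.startswith (ls.getD k "") " " = true then pvScanK ls (k + 1)
  else k
termination_by ls.length - k

-- termination fact for the outer loop: the scan never moves backwards
lemma pvScanK_ge (ls : List String) : ∀ k, k ≤ pvScanK ls k := by
  intro k
  induction hn : ls.length - k using Nat.strong_induction_on generalizing k with
  | _ n ih =>
    rw [pvScanK]
    split
    · next h => exact le_trans (by omega) (ih (ls.length - (k + 1)) (by omega) (k + 1) rfl)
    · exact le_refl k

-- the 'while i < n:' loop of B; lines[i:j] with 0 ≤ i ≤ j is exactly drop-then-take
def pvAltLoop (lines : List String) (i : Nat) : List (List String) :=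
  if i < lines.length then
    let j := pvScanK lines (i + 1)
    ((lines.drop i).take (j - i)) :: pvAltLoop lines j
  else []
termination_by lines.length - i
decreasing_by
  have := pvScanK_ge lines (i + 1)
  omega

def iter_fields_py_alt (lines : List String) : List (List String) :=
  if lines = [] then [] else [] :: pvAltLoop lines 0

-- ===== PRECONDITION & SPEC =====
def Spec_iter_fields_py (lines : List String) (out : List (List String)) : Prop := out = iter_fields_py_alt lines
instance (lines : List String) (out : List (List String)) : Decidable (Spec_iter_fields_py lines out) := by unfold Spec_iter_fields_py; infer_instance

-- ===== CLAIM (what is proved, stated in full; the proofs are below) =====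
def Claim_equal_iter_fields_py : Prop := ∀ (lines : List String), Dom_iter_fields_py lines → Spec_iter_fields_py lines (iter_fields_py lines)

-- ===== LEMMAS AND PROOFS =====

def pvP (s : String) : Bool := PySem.Str.startswith s " "

-- common reference shape both ports are reduced to
def pvGroups : List String → List (List String)
  | [] => []
  | head :: rest => (head :: rest.takeWhile pvP) :: pvGroups (rest.dropWhile pvP)
termination_by ls => ls.length
decreasing_by
  have := List.length_dropWhile_le (p := pvP) (l := rest)
  simp only [List.length_cons]
  omega

lemma pvTake_takeWhile (ls : List String) :
    ls.take ((ls.takeWhile pvP).length) = ls.takeWhile pvP := by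
  induction ls with
  | nil => simp
  | cons l ls ih =>
    by_cases h : pvP l = true
    · rw [List.takeWhile_cons_of_pos h]; simpa using ih
    · rw [List.takeWhile_cons_of_neg h]; simp

lemma pvDrop_dropWhile (ls : List String) :
    ls.drop ((ls.takeWhile pvP).length) = ls.dropWhile pvP := by
  induction ls with
  | nil => simp
  | cons l ls ih =>
    by_cases h : pvP l = true
    · rw [List.takeWhile_cons_of_pos h, List.dropWhile_cons_of_pos h]; simpa using ih
    · rw [List.takeWhile_cons_of_neg h, List.dropWhile_cons_of_neg h]; simp

lemma pvScanK_eq (ls : List String) :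
    ∀ k, pvScanK ls k = k + ((ls.drop k).takeWhile pvP).length := by
  intro k
  induction hn : ls.length - k using Nat.strong_induction_on generalizing k with
  | _ n ih =>
    rw [pvScanK]
    by_cases hk : k < ls.length
    · have hdrop : ls.drop k = ls[k] :: ls.drop (k + 1) := List.drop_eq_getElem_cons hk
      have hget : ls.getD k "" = ls[k] := List.getD_eq_getElem ls "" hk
      by_cases hp : pvP ls[k] = true
      · rw [if_pos ⟨hk, by rw [hget]; exact hp⟩,
          ih (ls.length - (k + 1)) (by omega) (k + 1) rfl, hdrop,
          List.takeWhile_cons_of_pos hp, List.length_cons]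
        omega
      · rw [if_neg (fun hc => hp (by rw [← hget]; exact hc.2)), hdrop,
          List.takeWhile_cons_of_neg hp]
        simp
    · rw [if_neg (fun hc => hk hc.1), List.drop_eq_nil_of_le (by omega)]
      simp

lemma pvAltLoop_eq (ls : List String) :
    ∀ i, pvAltLoop ls i = pvGroups (ls.drop i) := by
  intro i
  induction hn : ls.length - i using Nat.strong_induction_on generalizing i with
  | _ n ih =>
    rw [pvAltLoop]
    by_cases hi : i < ls.length
    · have hdrop : ls.drop i = ls[i] :: ls.drop (i + 1) := List.drop_eq_getElem_cons hi
      have hj : pvScanK ls (i + 1) = (i + 1) + ((ls.drop (i + 1)).takeWhile pvP).length :=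
        pvScanK_eq ls (i + 1)
      rw [if_pos hi]
      dsimp only
      conv_rhs => rw [hdrop, pvGroups]
      rw [ih (ls.length - pvScanK ls (i + 1)) (by omega) (pvScanK ls (i + 1)) rfl]
      congr 1
      · rw [hdrop, hj]
        have : i + 1 + ((ls.drop (i + 1)).takeWhile pvP).length - i
            = ((ls.drop (i + 1)).takeWhile pvP).length + 1 := by omega
        rw [this, List.take_succ_cons, pvTake_takeWhile]
      · have h2 : (ls.drop (i + 1)).dropWhile pvP
            = ls.drop (i + 1 + ((ls.drop (i + 1)).takeWhile pvP).length) := by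
          rw [← pvDrop_dropWhile, List.drop_drop]
        rw [hj, ← h2]
    · rw [if_neg hi, List.drop_eq_nil_of_le (by omega), pvGroups]

-- A's fold, started with a nonempty current block cl, yields out ++ the reference grouping
lemma pvFold_runs (ls : List String) :
    ∀ (out : List (List String)) (cl : List String), cl ≠ [] →
      (let st := ls.foldl pvStepA (out, cl)
       if st.2 ≠ [] then st.1 ++ [st.2] else st.1)
      = out ++ (cl ++ ls.takeWhile pvP) :: pvGroups (ls.dropWhile pvP) := by
  induction ls with
  | nil =>
    intro out cl hcl
    simp [hcl, pvGroups]
  | cons l ls ih =>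
    intro out cl hcl
    by_cases h : pvP l = true
    · simp only [List.foldl_cons, pvStepA, if_pos (⟨hcl, by simpa [pvP] using h⟩ :
        cl ≠ [] ∧ PySem.Str.startswith l " " = true)]
      rw [ih out (cl ++ [l]) (by simp)]
      rw [List.takeWhile_cons_of_pos h, List.dropWhile_cons_of_pos h]
      simp
    · have hc : ¬ (cl ≠ [] ∧ PySem.Str.startswith l " " = true) := by
        intro hc; exact h (by simpa [pvP] using hc.2)
      simp only [List.foldl_cons, pvStepA, if_neg hc]
      rw [ih (out ++ [cl]) [l] (by simp)]
      rw [List.takeWhile_cons_of_neg h, List.dropWhile_cons_of_neg h]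
      conv_rhs => rw [pvGroups]
      simp

-- ===== VERDICT (by name: the statement is the Claim_ definition above) =====
theorem iter_fields_py_spec : Claim_equal_iter_fields_py := by
  intro lines _
  show iter_fields_py lines = iter_fields_py_alt lines
  cases lines with
  | nil => rfl
  | cons l ls =>
    unfold iter_fields_py iter_fields_py_alt
    simp only [List.foldl_cons, pvStepA, List.nil_append, if_neg (by simp :
      ¬ (([] : List String) ≠ [] ∧ PySem.Str.startswith l " " = true))]
    rw [pvFold_runs ls [[]] [l] (by simp), pvAltLoop_eq (l :: ls) 0, List.drop_zero]
    conv_rhs => rw [pvGroups]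
    simp
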